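-- pv_equiv track=rewrite | github.com/hacktoolkit/code_challenges | adventofcode/2023/11.py | pretty_cosmos
-- ===== SOURCE A (Python) =====
-- def pretty_cosmos(cosmos, num_rows, num_cols):
--     s = (
--         '\n'.join(
--             [
--                 ''.join(
--                     [
--                         '#' if (m, n) in cosmos else '.'
--                         for n in range(num_cols)
--                     ]
--                 )
--                 for m in range(num_rows)
--             ]
--         )
--         + '\n'
--     )
--     return s
-- ===== SOURCE B (Python) =====
-- def pretty_cosmos(cosmos, num_rows, num_cols):
--     grid = [['.'] * num_cols for _ in range(num_rows)]
--     for (m, n) in cosmos: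
--         if 0 <= m < num_rows and 0 <= n < num_cols:
--             grid[m][n] = '#'
--     return '\n'.join(''.join(row) for row in grid) + '\n'
-- ===== Notes on version B (the rewrite author's own statement) =====
-- stated objective: alternative
-- what changed: Instead of testing membership of every (row,col) cell in cosmos, B allocates a dense '.'-grid once and marks only the in-range occupied points sparsely, then joins the rows; the grid allocation still dominates, so no speed is claimed.
import Mathlib
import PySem

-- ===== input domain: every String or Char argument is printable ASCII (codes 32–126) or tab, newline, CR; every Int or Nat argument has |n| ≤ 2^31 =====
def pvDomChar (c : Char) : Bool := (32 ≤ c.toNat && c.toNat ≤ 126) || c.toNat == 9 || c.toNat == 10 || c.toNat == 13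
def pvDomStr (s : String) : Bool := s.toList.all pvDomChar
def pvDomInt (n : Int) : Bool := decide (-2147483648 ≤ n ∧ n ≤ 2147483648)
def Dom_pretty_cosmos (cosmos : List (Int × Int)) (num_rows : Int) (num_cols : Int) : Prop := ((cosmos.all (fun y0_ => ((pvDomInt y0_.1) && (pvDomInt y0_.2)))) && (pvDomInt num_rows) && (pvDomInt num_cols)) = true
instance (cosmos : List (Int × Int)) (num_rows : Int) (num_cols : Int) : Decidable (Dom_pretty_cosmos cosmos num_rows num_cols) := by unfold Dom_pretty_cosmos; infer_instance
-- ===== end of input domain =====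

-- B replaces A's per-cell membership test by allocating a dense '.'-grid once and
-- marking only the in-range points of cosmos sparsely (objective: alternative).

-- ===== PORT A =====
def pretty_cosmos (cosmos : List (Int × Int)) (num_rows : Int) (num_cols : Int) : String :=
  (String.intercalate "\n"
    ((PySem.List.pyRange 0 num_rows 1).map (fun m =>
      String.mk ((PySem.List.pyRange 0 num_cols 1).map (fun n =>
        if (m, n) ∈ cosmos then '#' else '.'))))) ++ "\n"

-- ===== PORT B =====
-- one marking step of B's loop: set grid[m][n] := '#' when (m, n) is in range
def pcMark (num_rows num_cols : Int) (g : List (List Char)) (p : Int × Int) : List (List Char) :=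
  if 0 ≤ p.1 ∧ p.1 < num_rows ∧ 0 ≤ p.2 ∧ p.2 < num_cols then
    g.set p.1.toNat ((g.getD p.1.toNat []).set p.2.toNat '#')
  else g

def pretty_cosmos_alt (cosmos : List (Int × Int)) (num_rows : Int) (num_cols : Int) : String :=
  (String.intercalate "\n"
    ((cosmos.foldl (pcMark num_rows num_cols)
      ((List.range num_rows.toNat).map (fun _ => List.replicate num_cols.toNat '.'))).map String.mk)) ++ "\n"

-- ===== PRECONDITION & SPEC =====
def Spec_pretty_cosmos (cosmos : List (Int × Int)) (num_rows : Int) (num_cols : Int) (out : String) : Prop := out = pretty_cosmos_alt cosmos num_rows num_cols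
instance (cosmos : List (Int × Int)) (num_rows : Int) (num_cols : Int) (out : String) : Decidable (Spec_pretty_cosmos cosmos num_rows num_cols out) := by unfold Spec_pretty_cosmos; infer_instance

-- ===== CLAIM (what is proved, stated in full; the proofs are below) =====
def Claim_equal_pretty_cosmos : Prop := ∀ (cosmos : List (Int × Int)) (num_rows : Int) (num_cols : Int), Dom_pretty_cosmos cosmos num_rows num_cols → Spec_pretty_cosmos cosmos num_rows num_cols (pretty_cosmos cosmos num_rows num_cols)

-- ===== LEMMAS AND PROOFS =====

-- the grid A's comprehension denotes, parameterised by the set of points considered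
def pcGrid (s : List (Int × Int)) (R C : Int) : List (List Char) :=
  (PySem.List.pyRange 0 R 1).map (fun m =>
    (PySem.List.pyRange 0 C 1).map (fun n => if (m, n) ∈ s then '#' else '.'))

theorem set_map_pyRange {α : Type} (f : Int → α) (n : Int) (k : Nat) (x : α)
    (_hk : (k : Int) < n) :
    ((PySem.List.pyRange 0 n 1).map f).set k x
      = (PySem.List.pyRange 0 n 1).map (fun i => if i = (k : Int) then x else f i) := by
  apply List.ext_getElem
  · simp
  · intro j h1 h2
    simp only [List.length_set, List.length_map, PySem.List.length_pyRange_one] at h1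
    rw [List.getElem_set]
    simp only [List.getElem_map, PySem.List.getElem_pyRange_one]
    by_cases hj : k = j
    · simp [hj]
    · rw [if_neg hj, if_neg (show ¬ ((0 : Int) + (j : Int) = (k : Int)) by omega)]

theorem getD_map_pyRange {α : Type} (f : Int → α) (n : Int) (k : Nat) (d : α)
    (hk : (k : Int) < n) :
    ((PySem.List.pyRange 0 n 1).map f).getD k d = f k := by
  rw [List.getD_eq_getElem?_getD, List.getElem?_map]
  rw [PySem.List.getElem?_pyRange_one]
  simp only [show k < (n - 0).toNat by omega, if_pos]
  simp

theorem pcGrid_nil (R C : Int) :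
    pcGrid [] R C = (List.range R.toNat).map (fun _ => List.replicate C.toNat '.') := by
  unfold pcGrid
  simp only [List.not_mem_nil, if_false]
  rw [List.map_const', List.map_const', List.map_const',
    PySem.List.length_pyRange_one, PySem.List.length_pyRange_one,
    List.length_range, Int.sub_zero, Int.sub_zero]

theorem pcMark_pcGrid (R C : Int) (s : List (Int × Int)) (p : Int × Int) :
    pcMark R C (pcGrid s R C) p = pcGrid (s ++ [p]) R C := by
  obtain ⟨m, n⟩ := p
  unfold pcMark
  by_cases h : 0 ≤ m ∧ m < R ∧ 0 ≤ n ∧ n < C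
  · obtain ⟨h1, h2, h3, h4⟩ := h
    simp only [if_pos (And.intro h1 (And.intro h2 (And.intro h3 h4)))]
    unfold pcGrid
    rw [getD_map_pyRange _ R m.toNat _ (by omega)]
    rw [set_map_pyRange _ C n.toNat '#' (by omega)]
    rw [set_map_pyRange _ R m.toNat _ (by omega)]
    simp only [Int.toNat_of_nonneg h1, Int.toNat_of_nonneg h3]
    apply List.map_congr_left
    intro i hi
    rw [PySem.List.mem_pyRange_one] at hi
    by_cases him : i = m
    · subst him
      rw [if_pos rfl]
      apply List.map_congr_left
      intro j hj
      rw [PySem.List.mem_pyRange_one] at hj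
      by_cases hjn : j = n
      · subst hjn
        simp
      · have hmem : ((i, j) ∈ s ++ [(i, n)]) ↔ ((i, j) ∈ s) := by
          simp [hjn]
        rw [if_neg hjn]
        simp only [hmem]
    · simp only [if_neg him]
      apply List.map_congr_left
      intro j _
      have : ((i, j) ∈ s ++ [(m, n)]) ↔ ((i, j) ∈ s) := by
        simp only [List.mem_append, List.mem_singleton, Prod.mk.injEq]
        constructor
        · rintro (hx | ⟨hx1, _⟩)
          · exact hx
          · omega
        · exact fun hx => Or.inl hx
      simp [this]
  · simp only [if_neg h]
    unfold pcGrid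
    apply List.map_congr_left
    intro i hi
    rw [PySem.List.mem_pyRange_one] at hi
    apply List.map_congr_left
    intro j hj
    rw [PySem.List.mem_pyRange_one] at hj
    have : ((i, j) ∈ s ++ [(m, n)]) ↔ ((i, j) ∈ s) := by
      simp only [List.mem_append, List.mem_singleton, Prod.mk.injEq]
      constructor
      · rintro (hx | ⟨hx1, hx2⟩)
        · exact hx
        · exfalso; apply h; constructor <;> omega
      · exact fun hx => Or.inl hx
    simp [this]

theorem foldl_pcMark (R C : Int) (cs : List (Int × Int)) :
    ∀ s, cs.foldl (pcMark R C) (pcGrid s R C) = pcGrid (s ++ cs) R C := by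
  induction cs with
  | nil => intro s; simp
  | cons p cs ih =>
    intro s
    rw [List.foldl_cons, pcMark_pcGrid, ih (s ++ [p]), List.append_assoc]
    rfl

-- ===== VERDICT (by name: the statement is the Claim_ definition above) =====
theorem pretty_cosmos_spec : Claim_equal_pretty_cosmos := by
  intro cosmos R C _
  unfold Spec_pretty_cosmos pretty_cosmos pretty_cosmos_alt
  rw [← pcGrid_nil, foldl_pcMark R C cosmos []]
  unfold pcGrid
  simp only [List.map_map, List.nil_append, Function.comp_def]
  rfl
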